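-- pv_equiv track=rewrite | github.com/Kipngenocodes/Caesar-Cipher | sample.py | checking_dictionary_word
-- ===== SOURCE A (Python) =====
-- def checking_dictionary_word(password, english_words):
--     # Normalizes the password to lowercase
--     password_lowercase = password.lower()
--     # Checks the whole password
--     if password_lowercase in english_words:
--         return True
--     # Checking all substrings of the password
--     for i in range(len(password_lowercase)):
--         # Iterates over all possible substrings starting at index i
--         for j in range(i + 1, len(password_lowercase) + 1):
--             # Checks if any substring of the password is a dictionary word
--             if password_lowercase[i:j] in english_words:
--                 return True
--     # If no dictionary word is found, returns False
--     return False
-- ===== SOURCE B (Python) =====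
-- def checking_dictionary_word(password, english_words):
--     pw = password.lower()
--     words = set(english_words)
--     if pw in words:
--         return True
--     # a dictionary word occurs as a substring of the password iff some
--     # (nonempty) word is contained in the password
--     return any(w and w in pw for w in words)
-- ===== Notes on version B (the rewrite author's own statement) =====
-- stated objective: faster
-- what changed: Instead of enumerating all O(n^2) substrings and testing each for membership in the word list, B scans the dictionary once (as a set) and uses a single substring-containment test per word.
import Mathlib
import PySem

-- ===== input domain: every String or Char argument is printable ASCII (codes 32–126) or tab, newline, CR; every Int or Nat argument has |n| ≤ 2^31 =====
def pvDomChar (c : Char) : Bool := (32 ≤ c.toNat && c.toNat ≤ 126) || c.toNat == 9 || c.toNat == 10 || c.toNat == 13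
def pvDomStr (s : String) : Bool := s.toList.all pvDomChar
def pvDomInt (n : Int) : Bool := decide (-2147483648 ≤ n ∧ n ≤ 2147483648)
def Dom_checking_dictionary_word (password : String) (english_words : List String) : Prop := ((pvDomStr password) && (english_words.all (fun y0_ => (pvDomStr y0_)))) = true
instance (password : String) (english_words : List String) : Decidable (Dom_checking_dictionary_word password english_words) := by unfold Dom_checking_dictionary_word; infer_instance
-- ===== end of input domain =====

-- B replaces A's enumeration of all O(n^2) substrings (each tested against the whole
-- word list) by one substring-containment test per dictionary word.

-- ===== PORT A =====
def checking_dictionary_word (password : String) (english_words : List String) : Bool :=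
  let password_lowercase := PySem.Str.lower password
  if english_words.contains password_lowercase then true
  else
    (PySem.List.pyRange 0 (PySem.Str.len password_lowercase) 1).any (fun i =>
      (PySem.List.pyRange (i + 1) (PySem.Str.len password_lowercase + 1) 1).any (fun j =>
        english_words.contains (PySem.Str.slice password_lowercase (some i) (some j))))

-- ===== PORT B =====
def checking_dictionary_word_alt (password : String) (english_words : List String) : Bool :=
  let pw := PySem.Str.lower password
  let words : PySem.Set String := PySem.Set.ofList english_words
  if PySem.Set.contains words pw then true
  else words.any (fun w => (w != "") && PySem.Str.isIn w pw)

-- ===== PRECONDITION & SPEC =====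
def Spec_checking_dictionary_word (password : String) (english_words : List String) (out : Bool) : Prop := out = checking_dictionary_word_alt password english_words
instance (password : String) (english_words : List String) (out : Bool) : Decidable (Spec_checking_dictionary_word password english_words out) := by unfold Spec_checking_dictionary_word; infer_instance

-- ===== CLAIM (what is proved, stated in full; the proofs are below) =====
def Claim_equal_checking_dictionary_word : Prop := ∀ (password : String) (english_words : List String), Dom_checking_dictionary_word password english_words → Spec_checking_dictionary_word password english_words (checking_dictionary_word password english_words)

-- ===== LEMMAS AND PROOFS =====

-- a nonempty (drop i).take k is a nonempty infix
theorem pv_infix_drop_take {α : Type} (l : List α) (a b : Nat) :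
    (l.drop a).take b <:+: l :=
  ((l.drop a).take_prefix b).isInfix.trans (l.drop_suffix a).isInfix

-- A's inner double loop finds a word iff some nonempty word of the list is an infix
theorem pv_subst_iff (pw : String) (L : List String) :
    ((PySem.List.pyRange 0 (PySem.Str.len pw) 1).any (fun i =>
      (PySem.List.pyRange (i + 1) (PySem.Str.len pw + 1) 1).any (fun j =>
        L.contains (PySem.Str.slice pw (some i) (some j)))) = true)
    ↔ (∃ w ∈ L, w ≠ "" ∧ w.toList <:+: pw.toList) := by
  simp only [List.any_eq_true, PySem.List.mem_pyRange_one, List.contains_eq_mem,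
    decide_eq_true_eq, PySem.Str.len_eq]
  constructor
  · rintro ⟨i, ⟨hi0, hin⟩, j, ⟨hj1, hjn⟩, hmem⟩
    refine ⟨PySem.Str.slice pw (some i) (some j), hmem, ?_, ?_⟩
    · -- nonempty: 0 ≤ i < len, i+1 ≤ j
      intro hempty
      have h0 : 0 ≤ j := by omega
      have htl : (PySem.Str.slice pw (some i) (some j)).toList = [] := by
        rw [hempty]; rfl
      rw [PySem.Str.toList_slice] at htl
      simp only [PySem.Chars.slice] at htl
      rw [PySem.List.slice_toNat _ hi0 h0] at htl
      have : min (j.toNat - i.toNat) (pw.toList.length - i.toNat) = 0 := by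
        simpa [List.length_eq_zero_iff.symm, List.length_take, List.length_drop] using
          congrArg List.length htl
      omega
    · rw [PySem.Str.toList_slice]
      simp only [PySem.Chars.slice]
      rw [PySem.List.slice_toNat _ hi0 (by omega)]
      exact pv_infix_drop_take _ _ _
  · rintro ⟨w, hwL, hw0, pre, suf, hsplit⟩
    have hwlen : 0 < w.toList.length := by
      rcases Nat.eq_zero_or_pos w.toList.length with h | h
      · exact absurd (String.toList_inj.mp (by simpa [List.length_eq_zero_iff] using h)) hw0
      · exact h
    have hlen : pw.toList.length = pre.length + (w.toList.length + suf.length) := by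
      have := congrArg List.length hsplit
      simpa [List.length_append] using this.symm
    refine ⟨(pre.length : Int), ⟨by positivity, by exact_mod_cast (by omega : pre.length < pw.toList.length)⟩,
      ((pre.length : Int) + (w.toList.length : Int)), ⟨by omega, ?_⟩, ?_⟩
    · have : pre.length + w.toList.length ≤ pw.toList.length := by omega
      omega
    · have hslice : PySem.Str.slice pw (some (pre.length : Int))
          (some ((pre.length : Int) + (w.toList.length : Int))) = w := by
        apply String.toList_inj.mp
        rw [PySem.Str.toList_slice]
        simp only [PySem.Chars.slice]
        rw [PySem.List.slice_natCast_add]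
        rw [← hsplit, List.append_assoc, List.drop_left' rfl, List.take_left' rfl]
      rw [hslice]; exact hwL

-- ===== VERDICT (by name: the statement is the Claim_ definition above) =====
theorem checking_dictionary_word_spec : Claim_equal_checking_dictionary_word := by
  unfold Claim_equal_checking_dictionary_word
  intro password english_words _
  unfold Spec_checking_dictionary_word checking_dictionary_word checking_dictionary_word_alt
  set pw := PySem.Str.lower password with hpw
  by_cases hmem : pw ∈ english_words
  · simp [hmem]
  · have hA : english_words.contains pw = false := by simpa using hmem
    have hB : PySem.Set.contains (PySem.Set.ofList english_words) pw = false := by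
      simp [PySem.Set.contains_eq_listContains, hmem]
    simp only [hA, hB, Bool.false_eq_true, if_false]
    rw [Bool.eq_iff_iff, pv_subst_iff pw english_words]
    simp [List.any_eq_true, PySem.Set.mem_ofList, bne_iff_ne, PySem.Chars.isIn_iff_infix]
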